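-- pv_equiv track=rewrite | github.com/RAG4SE/RAGalyze | ragalyze/agent.py | _clean_type_name
-- ===== SOURCE A (Python) =====
-- def _clean_type_name(type_name: str) -> str:
--     """
--     Clean the type name by removing any leading or trailing whitespace or type decorators such as &, *, const, volatile, etc.
--
--     Args:
--         type_name: The type name to clean
--
--     Returns:
--         The cleaned type name
--     """
--     type_name = type_name.strip()
--     in_while = True
--     while in_while:
--         if type_name.startswith("const "):
--             type_name = type_name[6:]
--         elif type_name.startswith("static "):
--             type_name = type_name[7:]
--         elif type_name.startswith("constexpr "):
--             type_name = type_name[10:]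
--         elif type_name.startswith("volatile "):
--             type_name = type_name[9:]
--         elif type_name.endswith("&"):
--             type_name = type_name[:-1]
--         elif type_name.endswith("*"):
--             type_name = type_name[:-1]
--         else:
--             in_while = False
--     type_name = type_name.strip()
--     return type_name
-- ===== SOURCE B (Python) =====
-- import re
--
-- _QUALS = re.compile(r'^(?:const |static |constexpr |volatile )+')
-- _TRAIL = re.compile(r'[&*]+$')
--
-- def _clean_type_name(type_name: str) -> str:
--     """Regex-based: strip, remove leading qualifiers in one sub, remove trailing &/* in one sub, strip."""
--     s = type_name.strip()
--     s = _QUALS.sub('', s)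
--     s = _TRAIL.sub('', s)
--     return s.strip()
-- ===== Notes on version B (the rewrite author's own statement) =====
-- stated objective: idiomatic
-- what changed: Replaces A's six-branch fixpoint while-loop by three independent passes: strip, one anchored regex removing the whole run of leading qualifiers, one regex removing the trailing run of &/*, strip.
import Mathlib
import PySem

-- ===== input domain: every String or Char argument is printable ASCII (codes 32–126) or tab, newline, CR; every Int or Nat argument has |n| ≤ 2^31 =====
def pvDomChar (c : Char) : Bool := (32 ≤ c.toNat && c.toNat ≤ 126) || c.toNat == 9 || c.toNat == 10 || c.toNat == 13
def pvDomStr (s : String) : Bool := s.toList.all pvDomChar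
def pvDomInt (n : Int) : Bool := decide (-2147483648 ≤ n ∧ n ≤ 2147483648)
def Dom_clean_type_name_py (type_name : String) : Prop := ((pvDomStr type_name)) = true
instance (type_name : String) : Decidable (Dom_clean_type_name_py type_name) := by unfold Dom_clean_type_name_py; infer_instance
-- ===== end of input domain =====

-- B replaces A's six-branch fixpoint while-loop by three independent passes
-- (one anchored regex removing all leading qualifiers, one regex removing trailing &/*, strip);
-- objective: idiomatic. Return values agree on all inputs.

-- ===== PORT A =====
-- the while-loop of A: each branch is the transliteration of one if/elif arm
def pvALoop (s : List Char) : List Char :=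
  if PySem.Chars.startswith s "const ".toList then
    pvALoop (PySem.Chars.slice s (some 6) none)            -- type_name[6:]
  else if PySem.Chars.startswith s "static ".toList then
    pvALoop (PySem.Chars.slice s (some 7) none)            -- type_name[7:]
  else if PySem.Chars.startswith s "constexpr ".toList then
    pvALoop (PySem.Chars.slice s (some 10) none)           -- type_name[10:]
  else if PySem.Chars.startswith s "volatile ".toList then
    pvALoop (PySem.Chars.slice s (some 9) none)            -- type_name[9:]
  else if PySem.Chars.endswith s "&".toList then
    pvALoop (PySem.Chars.slice s none (some (-1)))         -- type_name[:-1]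
  else if PySem.Chars.endswith s "*".toList then
    pvALoop (PySem.Chars.slice s none (some (-1)))         -- type_name[:-1]
  else s
termination_by s.length
decreasing_by
  all_goals (rename_i h; first
    | (have hp := (PySem.Chars.startswith_iff _ _).mp h
       have hl := hp.length_le
       simp only [PySem.Chars.slice_eq_listSlice]
       rw [PySem.List.slice_from s (by norm_num)]
       simp only [List.length_drop]
       simp at hl
       omega)
    | (have hs := (PySem.Chars.endswith_iff _ _).mp h
       have hne : s ≠ [] := by rintro rfl; simp at hs
       simp only [PySem.Chars.slice_eq_listSlice, PySem.List.slice_to_neg_one]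
       have := List.length_pos_of_ne_nil hne
       simp; omega))

def clean_type_name_py (type_name : String) : String :=
  String.ofList (PySem.Chars.strip (pvALoop (PySem.Chars.strip type_name.toList)))

-- ===== PORT B =====
-- the alternatives of the anchored regex (?:const |static |constexpr |volatile )+, in order
def pvQuals : List (List Char) := ["const ".toList, "static ".toList, "constexpr ".toList, "volatile ".toList]

-- _QUALS.sub('', s): the anchored repeated ordered alternation removes, at the front,
-- the first alternative that matches, as long as one matches (exact regex semantics)
def pvDropQuals (s : List Char) : List Char :=
  match h : pvQuals.find? (fun q => decide (q <+: s)) with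
  | some q => pvDropQuals (s.drop q.length)
  | none => s
termination_by s.length
decreasing_by
  have hq : (q <+: s) := of_decide_eq_true (List.find?_some (p := fun r => decide (r <+: s)) h)
  have hmem := List.mem_of_find?_eq_some h
  have hne : q ≠ [] := by fin_cases hmem <;> simp
  have h1 := hq.length_le
  have h2 := List.length_pos_of_ne_nil hne
  simp; omega

def pvIsTrail (c : Char) : Bool := c == '&' || c == '*'

-- _TRAIL.sub('', s): remove the maximal run of &/* at the end (exact regex semantics)
def pvRstripTrail (s : List Char) : List Char := (s.reverse.dropWhile pvIsTrail).reverse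

def clean_type_name_py_alt (type_name : String) : String :=
  String.ofList (PySem.Chars.strip (pvRstripTrail (pvDropQuals (PySem.Chars.strip type_name.toList))))

-- ===== PRECONDITION & SPEC =====
def Spec_clean_type_name_py (type_name : String) (out : String) : Prop := out = clean_type_name_py_alt type_name
instance (type_name : String) (out : String) : Decidable (Spec_clean_type_name_py type_name out) := by unfold Spec_clean_type_name_py; infer_instance

-- ===== CLAIM (what is proved, stated in full; the proofs are below) =====
def Claim_equal_clean_type_name_py : Prop := ∀ (type_name : String), Dom_clean_type_name_py type_name → Spec_clean_type_name_py type_name (clean_type_name_py type_name)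

-- ===== LEMMAS AND PROOFS =====
-- one step of the regex alternation
theorem pvDropQuals_step (s : List Char) (q : List Char)
    (hfind : pvQuals.find? (fun r => decide (r <+: s)) = some q) :
    pvDropQuals s = pvDropQuals (s.drop q.length) := by
  rw [pvDropQuals]
  split
  next q2 hq2 =>
    rw [hfind] at hq2
    injection hq2 with hq2
    rw [hq2]
  next hq2 => rw [hfind] at hq2; cases hq2

-- the regex removes nothing when no alternative matches at the front
theorem pvDropQuals_eq_self (s : List Char) (h : ∀ q ∈ pvQuals, ¬ q <+: s) :
    pvDropQuals s = s := by
  rw [pvDropQuals]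
  have hn : pvQuals.find? (fun r => decide (r <+: s)) = none :=
    List.find?_eq_none.mpr (by intro q hq; simpa using h q hq)
  split
  next q2 hq2 => rw [hn] at hq2; cases hq2
  next => rfl

-- stripping a trailing &/* commutes with the trailing-run regex
theorem pvRstrip_concat (t : List Char) (c : Char) (hc : pvIsTrail c = true) :
    pvRstripTrail (t ++ [c]) = pvRstripTrail t := by
  simp [pvRstripTrail, hc]

-- the trailing-run regex removes nothing when the last char is not &/*
theorem pvRstrip_eq_self (s : List Char) (ha : ¬ ("&".toList <:+ s)) (hb : ¬ ("*".toList <:+ s)) :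
    pvRstripTrail s = s := by
  cases hrev : s.reverse with
  | nil =>
    have hs : s = [] := by simpa using congrArg List.reverse hrev
    simp [pvRstripTrail, hs]
  | cons c t =>
    have hs : s = t.reverse ++ [c] := by
      have := congrArg List.reverse hrev
      simpa using this
    have hc : pvIsTrail c = false := by
      simp only [pvIsTrail, Bool.or_eq_false_iff, beq_eq_false_iff_ne, ne_eq]
      constructor
      · rintro rfl; exact ha ⟨t.reverse, hs.symm⟩
      · rintro rfl; exact hb ⟨t.reverse, hs.symm⟩
    simp [pvRstripTrail, hrev, hc]
    exact hs.symm

theorem pvALoop_eq (s : List Char) : pvALoop s = pvRstripTrail (pvDropQuals s) := by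
  induction s using pvALoop.induct with
  | case1 s h ih =>
    have hp := (PySem.Chars.startswith_iff _ _).mp h
    have e : pvQuals.find? (fun r => decide (r <+: s)) = some ("const ".toList) := by
      simp only [pvQuals]
      rw [List.find?_cons_of_pos (by exact decide_eq_true hp)]
    rw [pvALoop, if_pos h, pvDropQuals_step s _ e]
    rw [PySem.Chars.slice_eq_listSlice, PySem.List.slice_from s (by norm_num)] at ih ⊢
    simpa using ih
  | case2 s h1 h ih =>
    have hp := (PySem.Chars.startswith_iff _ _).mp h
    have d1 : decide ("const ".toList <+: s) = false := by
      simpa [PySem.Chars.startswith_iff] using h1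
    have e : pvQuals.find? (fun r => decide (r <+: s)) = some ("static ".toList) := by
      simp only [pvQuals]
      rw [List.find?_cons_of_neg (by simpa using d1),
        List.find?_cons_of_pos (by exact decide_eq_true hp)]
    rw [pvALoop, if_neg h1, if_pos h, pvDropQuals_step s _ e]
    rw [PySem.Chars.slice_eq_listSlice, PySem.List.slice_from s (by norm_num)] at ih ⊢
    simpa using ih
  | case3 s h1 h2 h ih =>
    have hp := (PySem.Chars.startswith_iff _ _).mp h
    have d1 : decide ("const ".toList <+: s) = false := by
      simpa [PySem.Chars.startswith_iff] using h1
    have d2 : decide ("static ".toList <+: s) = false := by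
      simpa [PySem.Chars.startswith_iff] using h2
    have e : pvQuals.find? (fun r => decide (r <+: s)) = some ("constexpr ".toList) := by
      simp only [pvQuals]
      rw [List.find?_cons_of_neg (by simpa using d1), List.find?_cons_of_neg (by simpa using d2),
        List.find?_cons_of_pos (by exact decide_eq_true hp)]
    rw [pvALoop, if_neg h1, if_neg h2, if_pos h, pvDropQuals_step s _ e]
    rw [PySem.Chars.slice_eq_listSlice, PySem.List.slice_from s (by norm_num)] at ih ⊢
    simpa using ih
  | case4 s h1 h2 h3 h ih =>
    have hp := (PySem.Chars.startswith_iff _ _).mp h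
    have d1 : decide ("const ".toList <+: s) = false := by
      simpa [PySem.Chars.startswith_iff] using h1
    have d2 : decide ("static ".toList <+: s) = false := by
      simpa [PySem.Chars.startswith_iff] using h2
    have d3 : decide ("constexpr ".toList <+: s) = false := by
      simpa [PySem.Chars.startswith_iff] using h3
    have e : pvQuals.find? (fun r => decide (r <+: s)) = some ("volatile ".toList) := by
      simp only [pvQuals]
      rw [List.find?_cons_of_neg (by simpa using d1), List.find?_cons_of_neg (by simpa using d2),
        List.find?_cons_of_neg (by simpa using d3),
        List.find?_cons_of_pos (by exact decide_eq_true hp)]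
    rw [pvALoop, if_neg h1, if_neg h2, if_neg h3, if_pos h, pvDropQuals_step s _ e]
    rw [PySem.Chars.slice_eq_listSlice, PySem.List.slice_from s (by norm_num)] at ih ⊢
    simpa using ih
  | case5 s h1 h2 h3 h4 h ih =>
    obtain ⟨u, hu0⟩ := (PySem.Chars.endswith_iff _ _).mp h
    have hu : u ++ ['&'] = s := hu0
    have hnp : ∀ q ∈ pvQuals, ¬ q <+: s := by
      intro q hq hpre
      fin_cases hq
      · exact h1 ((PySem.Chars.startswith_iff _ _).mpr hpre)
      · exact h2 ((PySem.Chars.startswith_iff _ _).mpr hpre)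
      · exact h3 ((PySem.Chars.startswith_iff _ _).mpr hpre)
      · exact h4 ((PySem.Chars.startswith_iff _ _).mpr hpre)
    have hnpu : ∀ q ∈ pvQuals, ¬ q <+: u := by
      intro q hq hpre
      exact hnp q hq (by rw [← hu]; exact hpre.trans (List.prefix_append u _))
    have hdrop : PySem.Chars.slice s none (some (-1)) = u := by
      rw [PySem.Chars.slice_eq_listSlice, PySem.List.slice_to_neg_one, ← hu]
      exact List.dropLast_concat
    rw [pvALoop, if_neg h1, if_neg h2, if_neg h3, if_neg h4, if_pos h, hdrop]
    rw [hdrop] at ih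
    rw [ih, pvDropQuals_eq_self s hnp, pvDropQuals_eq_self u hnpu, ← hu,
      pvRstrip_concat u '&' (by decide)]
  | case6 s h1 h2 h3 h4 h5 h ih =>
    obtain ⟨u, hu0⟩ := (PySem.Chars.endswith_iff _ _).mp h
    have hu : u ++ ['*'] = s := hu0
    have hnp : ∀ q ∈ pvQuals, ¬ q <+: s := by
      intro q hq hpre
      fin_cases hq
      · exact h1 ((PySem.Chars.startswith_iff _ _).mpr hpre)
      · exact h2 ((PySem.Chars.startswith_iff _ _).mpr hpre)
      · exact h3 ((PySem.Chars.startswith_iff _ _).mpr hpre)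
      · exact h4 ((PySem.Chars.startswith_iff _ _).mpr hpre)
    have hnpu : ∀ q ∈ pvQuals, ¬ q <+: u := by
      intro q hq hpre
      exact hnp q hq (by rw [← hu]; exact hpre.trans (List.prefix_append u _))
    have hdrop : PySem.Chars.slice s none (some (-1)) = u := by
      rw [PySem.Chars.slice_eq_listSlice, PySem.List.slice_to_neg_one, ← hu]
      exact List.dropLast_concat
    rw [pvALoop, if_neg h1, if_neg h2, if_neg h3, if_neg h4, if_neg h5, if_pos h, hdrop]
    rw [hdrop] at ih
    rw [ih, pvDropQuals_eq_self s hnp, pvDropQuals_eq_self u hnpu, ← hu,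
      pvRstrip_concat u '*' (by decide)]
  | case7 s h1 h2 h3 h4 h5 h6 =>
    have hnp : ∀ q ∈ pvQuals, ¬ q <+: s := by
      intro q hq hpre
      fin_cases hq
      · exact h1 ((PySem.Chars.startswith_iff _ _).mpr hpre)
      · exact h2 ((PySem.Chars.startswith_iff _ _).mpr hpre)
      · exact h3 ((PySem.Chars.startswith_iff _ _).mpr hpre)
      · exact h4 ((PySem.Chars.startswith_iff _ _).mpr hpre)
    have ha : ¬ ("&".toList <:+ s) := fun hs => h5 ((PySem.Chars.endswith_iff _ _).mpr hs)
    have hb : ¬ ("*".toList <:+ s) := fun hs => h6 ((PySem.Chars.endswith_iff _ _).mpr hs)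
    rw [pvALoop, if_neg h1, if_neg h2, if_neg h3, if_neg h4, if_neg h5, if_neg h6,
      pvDropQuals_eq_self s hnp, pvRstrip_eq_self s ha hb]

-- ===== VERDICT (by name: the statement is the Claim_ definition above) =====
theorem clean_type_name_py_spec : Claim_equal_clean_type_name_py := by
  intro t _
  unfold Spec_clean_type_name_py clean_type_name_py clean_type_name_py_alt
  rw [pvALoop_eq]
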